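-- pv_equiv track=rewrite | github.com/benediktms/unimatrix | src/skills/recon/ensure-brain.py | parse_refs
-- ===== SOURCE A (Python) =====
-- def parse_refs(args: list[str]) -> list[str]:
--     """Expand comma-separated arguments into individual refs."""
--     refs = []
--     for arg in args:
--         for part in arg.split(","):
--             stripped = part.strip()
--             if stripped:
--                 refs.append(stripped)
--     return refs
-- ===== SOURCE B (Python) =====
-- def parse_refs(args: list[str]) -> list[str]:
--     """Expand comma-separated arguments into individual refs.
--
--     Single character-level scan (state machine): no split()/strip() calls.
--     `cur` holds the current token without leading whitespace; `pending`
--     buffers interior whitespace that is only committed when another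
--     non-space character follows, so trailing whitespace never lands in
--     the token. A comma or the end of an argument flushes the token.
--     """
--     refs = []
--     for arg in args:
--         cur = []
--         pending = []
--         for ch in arg:
--             if ch == ',':
--                 if cur:
--                     refs.append(''.join(cur))
--                 cur = []
--                 pending = []
--             elif ch.isspace():
--                 if cur:
--                     pending.append(ch)
--             else:
--                 cur += pending
--                 pending = []
--                 cur.append(ch)
--         if cur:
--             refs.append(''.join(cur))
--     return refs
-- ===== Notes on version B (the rewrite author's own statement) =====
-- stated objective: alternative
-- what changed: Replaces A's split-on-comma + strip + filter pipeline with a single character-level state machine that scans each argument once, buffering interior whitespace and flushing tokens at commas and argument ends, never calling split or strip.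
import Mathlib
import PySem

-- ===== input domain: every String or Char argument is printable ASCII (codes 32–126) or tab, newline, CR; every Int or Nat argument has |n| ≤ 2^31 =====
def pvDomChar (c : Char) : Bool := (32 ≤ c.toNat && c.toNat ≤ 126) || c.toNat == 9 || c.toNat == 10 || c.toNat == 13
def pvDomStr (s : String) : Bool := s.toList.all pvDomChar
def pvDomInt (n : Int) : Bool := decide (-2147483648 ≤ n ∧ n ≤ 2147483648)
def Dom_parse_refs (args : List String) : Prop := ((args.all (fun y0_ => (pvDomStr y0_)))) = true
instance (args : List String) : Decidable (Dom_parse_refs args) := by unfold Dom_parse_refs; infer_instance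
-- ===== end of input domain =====

-- B replaces A's split/strip/filter pipeline with a single character-level state machine
-- (one scan per argument, whitespace buffered, tokens flushed at commas and arg ends); alternative
-- algorithm of the same cost.

-- ===== PORT A =====
def parse_refs (args : List String) : List String :=
  args.foldl (fun refs arg =>
    ((PySem.Str.split? arg ",").getD []).foldl (fun refs part =>
      let stripped := PySem.Str.strip part
      if stripped ≠ "" then refs ++ [stripped] else refs) refs) []

-- ===== PORT B =====
/-- the inner character loop of B: `cur` is the current token so far (no leading
whitespace), `pending` the buffered interior whitespace, `refs` the output so far. -/
def scanArg : List Char → List Char → List Char → List String → List String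
  | [], cur, _pending, refs =>
      if cur ≠ [] then refs ++ [String.ofList cur] else refs
  | c :: rest, cur, pending, refs =>
      if c = ',' then
        scanArg rest [] [] (if cur ≠ [] then refs ++ [String.ofList cur] else refs)
      else if PySem.Chars.isspace c then
        scanArg rest cur (if cur ≠ [] then pending ++ [c] else pending) refs
      else
        scanArg rest (cur ++ pending ++ [c]) [] refs

def parse_refs_alt (args : List String) : List String :=
  args.foldl (fun refs arg => scanArg arg.toList [] [] refs) []

-- ===== PRECONDITION & SPEC =====
def Spec_parse_refs (args : List String) (out : List String) : Prop := out = parse_refs_alt args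
instance (args : List String) (out : List String) : Decidable (Spec_parse_refs args out) := by unfold Spec_parse_refs; infer_instance

-- ===== CLAIM (what is proved, stated in full; the proofs are below) =====
def Claim_equal_parse_refs : Prop := ∀ (args : List String), Dom_parse_refs args → Spec_parse_refs args (parse_refs args)

-- ===== LEMMAS AND PROOFS =====

/-- Splitting a char list on a single comma, simple structural recursion. -/
def split1 : List Char → List (List Char)
  | [] => [[]]
  | c :: rest => if c = ',' then [] :: split1 rest else (split1 rest).modifyHead (c :: ·)

theorem split1_ne_nil (l : List Char) : split1 l ≠ [] := by
  induction l with
  | nil => simp [split1]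
  | cons c rest ih =>
    simp only [split1]
    split_ifs <;> simp_all [List.modifyHead]
    cases h : split1 rest <;> simp_all

theorem go_eq (fuel : Nat) (l cur : List Char) (acc : List (List Char)) (h : l.length ≤ fuel) :
    PySem.Chars.splitOn.go [','] fuel l cur acc
      = acc.reverse ++ (split1 l).modifyHead (cur.reverse ++ ·) := by
  induction fuel generalizing l cur acc with
  | zero =>
    have : l = [] := by cases l <;> simp_all
    subst this
    simp [PySem.Chars.splitOn.go, split1]
  | succ fuel ih =>
    cases l with
    | nil => simp [PySem.Chars.splitOn.go, split1]
    | cons c rest =>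
      simp only [PySem.Chars.splitOn.go]
      by_cases hc : c = ','
      · subst hc
        rw [if_pos (by simp [List.isPrefixOf])]
        have hd : List.drop ([','] : List Char).length (',' :: rest) = rest := rfl
        rw [hd, ih rest [] _ (by simpa using h)]
        cases hs : split1 rest <;> simp [split1, hs, List.modifyHead]
      · rw [if_neg (by simp [List.isPrefixOf, Ne.symm hc])]
        rw [ih rest (c :: cur) acc (by simpa using h)]
        have hne := split1_ne_nil rest
        cases hs : split1 rest with
        | nil => exact absurd hs hne
        | cons x xs => simp [split1, hc, hs, List.modifyHead]

theorem splitOn_comma (l : List Char) : PySem.Chars.splitOn l [','] = split1 l := by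
  rw [show PySem.Chars.splitOn l [','] = PySem.Chars.splitOn.go [','] (l.length + 1) l [] [] from rfl]
  rw [go_eq _ _ _ _ (by omega)]
  cases hs : split1 l <;> simp [List.modifyHead]

/-- the char-level keep-or-drop of one piece -/
def fCh (part : List Char) : Option (List Char) :=
  let s := PySem.Chars.strip part
  if s ≠ [] then some s else none

/-- the string-level keep-or-drop of one piece -/
def fStr (part : String) : Option String :=
  let s := PySem.Str.strip part
  if s ≠ "" then some s else none

theorem fStr_ofList (l : List Char) :
    fStr (String.ofList l) = (fCh l).map String.ofList := by
  simp only [fStr, fCh, PySem.Str.strip]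
  by_cases h : PySem.Chars.strip ((String.ofList l).toList) = []
  · simp only [h]
    have h2 : PySem.Chars.strip l = [] := by simpa using h
    simp [h2]
  · have h2 : PySem.Chars.strip l ≠ [] := by simpa using h
    simp only [String.toList_ofList] at h ⊢
    simp [h2]

theorem split_comma_str (s : String) :
    (PySem.Str.split? s ",").getD [] = (split1 s.toList).map String.ofList := by
  have h := PySem.Str.split?_map s ","
  have hsep : ("," : String).toList = [','] := by decide
  rw [hsep] at h
  simp only [PySem.Chars.split?, List.isEmpty] at h
  rw [splitOn_comma] at h
  cases he : PySem.Str.split? s "," with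
  | none => rw [he] at h; simp at h
  | some ps =>
    rw [he] at h
    simp only [Option.map_some] at h
    have hps : ps.map String.toList = split1 s.toList := by
      simpa using h
    have : ps = (split1 s.toList).map String.ofList := by
      rw [← hps, List.map_map]
      simp [Function.comp_def]
    simp [this]

theorem filterMap_fStr_map (l : List (List Char)) :
    (l.map String.ofList).filterMap fStr = (l.filterMap fCh).map String.ofList := by
  rw [List.filterMap_map, List.map_filterMap]
  apply List.filterMap_congr
  intro x _
  rw [Function.comp_apply, fStr_ofList]

theorem inner_foldl (parts : List String) (refs : List String) :
    parts.foldl (fun refs part =>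
      let stripped := PySem.Str.strip part
      if stripped ≠ "" then refs ++ [stripped] else refs) refs
      = refs ++ parts.filterMap fStr := by
  induction parts generalizing refs with
  | nil => simp
  | cons p rest ih =>
    rw [List.foldl_cons, List.filterMap_cons]
    by_cases h : PySem.Str.strip p = ""
    · rw [show fStr p = none by simp [fStr, h]]
      simpa [h] using ih refs
    · rw [show fStr p = some (PySem.Str.strip p) by simp [fStr, h]]
      simpa [h] using ih (refs ++ [PySem.Str.strip p])

theorem outer_foldl (args : List String) (refs : List String) :
    args.foldl (fun refs arg =>
      ((PySem.Str.split? arg ",").getD []).foldl (fun refs part =>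
        let stripped := PySem.Str.strip part
        if stripped ≠ "" then refs ++ [stripped] else refs) refs) refs
      = refs ++ args.flatMap (fun a => ((PySem.Str.split? a ",").getD []).filterMap fStr) := by
  induction args generalizing refs with
  | nil => simp
  | cons a rest ih =>
    simp only [List.foldl_cons, List.flatMap_cons]
    rw [inner_foldl, ih, List.append_assoc]

theorem parse_refs_eq (args : List String) :
    parse_refs args
      = args.flatMap
          (fun a => ((split1 a.toList).filterMap fCh).map String.ofList) := by
  unfold parse_refs
  rw [outer_foldl]
  simp only [List.nil_append, split_comma_str, filterMap_fStr_map]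

-- whitespace / strip helper lemmas for the state-machine side

theorem rstrip_all_space (l : List Char) (h : l.all PySem.Chars.isspace) :
    PySem.Chars.rstrip l = [] := by
  simp only [PySem.Chars.rstrip, List.reverse_eq_nil_iff, List.dropWhile_eq_nil_iff]
  intro x hx
  exact List.all_eq_true.mp h x (List.mem_reverse.mp hx)

theorem strip_cons_space (c : Char) (q : List Char) (h : PySem.Chars.isspace c = true) :
    PySem.Chars.strip (c :: q) = PySem.Chars.strip q := by
  simp [PySem.Chars.strip, PySem.Chars.lstrip, h]

theorem rstrip_mid (xs : List Char) (c : Char) (q : List Char)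
    (h : PySem.Chars.isspace c = false) :
    PySem.Chars.rstrip (xs ++ c :: q) = xs ++ c :: PySem.Chars.rstrip q := by
  simp only [PySem.Chars.rstrip, List.reverse_append, List.reverse_cons]
  rw [List.append_assoc, List.dropWhile_append]
  by_cases he : (List.dropWhile PySem.Chars.isspace q.reverse).isEmpty
  · rw [if_pos he]
    rw [List.isEmpty_iff] at he
    simp [h, he]
  · rw [if_neg he]
    simp

theorem strip_cons_nonspace (c : Char) (q : List Char) (h : PySem.Chars.isspace c = false) :
    PySem.Chars.strip (c :: q) = c :: PySem.Chars.rstrip q := by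
  simp only [PySem.Chars.strip, PySem.Chars.lstrip, List.dropWhile_cons, h, Bool.false_eq_true,
    if_false]
  exact rstrip_mid [] c q h

/-- what the scan emits for the piece currently being read -/
def firstTok (cur pending p : List Char) : List String :=
  let t := if cur = [] then PySem.Chars.strip p
           else cur ++ PySem.Chars.rstrip (pending ++ p)
  if t ≠ [] then [String.ofList t] else []

theorem firstTok_nil_nil (p : List Char) :
    firstTok [] [] p = (([p].filterMap fCh)).map String.ofList := by
  simp only [firstTok, fCh, List.filterMap_cons, List.filterMap_nil]
  by_cases h : PySem.Chars.strip p = [] <;> simp [h]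

/-- main invariant of the character scan -/
theorem scanArg_eq (l : List Char) : ∀ (cur pending : List Char) (refs : List String)
    (p : List Char) (ps : List (List Char)),
    split1 l = p :: ps →
    pending.all PySem.Chars.isspace →
    (cur = [] → pending = []) →
    scanArg l cur pending refs
      = refs ++ firstTok cur pending p ++ (ps.filterMap fCh).map String.ofList := by
  induction l with
  | nil =>
    intro cur pending refs p ps hs hws hcp
    simp only [split1] at hs
    obtain ⟨hp, hps⟩ : ([] : List Char) = p ∧ ([] : List (List Char)) = ps := by
      simpa using hs
    subst hp; subst hps
    by_cases hc : cur = []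
    · have : pending = [] := hcp hc
      subst hc this
      simp [scanArg, firstTok, PySem.Chars.strip, PySem.Chars.lstrip, PySem.Chars.rstrip]
    · simp only [scanArg, if_pos (by exact hc)]
      simp [firstTok, hc, rstrip_all_space pending hws]
  | cons c rest ih =>
    intro cur pending refs p ps hs hws hcp
    by_cases hc : c = ','
    · subst hc
      simp only [split1] at hs
      obtain ⟨hp, hps⟩ : ([] : List Char) = p ∧ split1 rest = ps := by simpa using hs
      subst hp; subst hps
      obtain ⟨q, qs, hq⟩ : ∃ q qs, split1 rest = q :: qs := by
        cases h : split1 rest with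
        | nil => exact absurd h (split1_ne_nil rest)
        | cons q qs => exact ⟨q, qs, rfl⟩
      simp only [scanArg]
      rw [ih [] [] _ q qs hq (by simp) (fun _ => rfl), hq]
      rw [firstTok_nil_nil]
      by_cases hcur : cur = []
      · subst hcur
        have : pending = [] := hcp rfl
        subst this
        cases hfq : fCh q <;>
          simp [firstTok, PySem.Chars.strip, PySem.Chars.lstrip, PySem.Chars.rstrip,
            hfq]
      · simp only [if_pos (by exact hcur)]
        have hft : firstTok cur pending [] = [String.ofList cur] := by
          simp [firstTok, hcur, rstrip_all_space pending hws]
        rw [hft]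
        cases hfq : fCh q <;> simp [hfq]
    · obtain ⟨q, qs, hq⟩ : ∃ q qs, split1 rest = q :: qs := by
        cases h : split1 rest with
        | nil => exact absurd h (split1_ne_nil rest)
        | cons q qs => exact ⟨q, qs, rfl⟩
      simp only [split1, if_neg hc, hq, List.modifyHead] at hs
      obtain ⟨hp, hps⟩ : c :: q = p ∧ qs = ps := by simpa using hs
      subst hp; subst hps
      by_cases hsp : PySem.Chars.isspace c
      · simp only [scanArg, if_neg hc, if_pos hsp]
        by_cases hcur : cur = []
        · have hpe : pending = [] := hcp hcur
          subst hcur; subst hpe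
          simp only [ne_eq, not_true_eq_false, if_false]
          rw [ih [] [] refs q qs hq (by simp) (fun _ => rfl)]
          have : firstTok [] [] (c :: q) = firstTok [] [] q := by
            simp [firstTok, strip_cons_space c q hsp]
          rw [this]
        · simp only [if_pos (by exact hcur)]
          rw [ih cur (pending ++ [c]) refs q qs hq
            (by simp_all [List.all_append]) (fun h => absurd h hcur)]
          have : firstTok cur (pending ++ [c]) q = firstTok cur pending (c :: q) := by
            simp [firstTok, hcur, List.append_assoc]
          rw [this]
      · have hsp' : PySem.Chars.isspace c = false := by simpa using hsp
        simp only [scanArg, if_neg hc, hsp', Bool.false_eq_true, if_false]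
        rw [ih (cur ++ pending ++ [c]) [] refs q qs hq (by simp) (by simp)]
        have : firstTok (cur ++ pending ++ [c]) [] q = firstTok cur pending (c :: q) := by
          by_cases hcur : cur = []
          · have hpe : pending = [] := hcp hcur
            subst hcur; subst hpe
            simp [firstTok, strip_cons_nonspace c q hsp']
          · simp [firstTok, hcur, rstrip_mid pending c q hsp', List.append_assoc]
        rw [this]

theorem scanArg_spec (a : String) (refs : List String) :
    scanArg a.toList [] [] refs
      = refs ++ ((split1 a.toList).filterMap fCh).map String.ofList := by
  obtain ⟨q, qs, hq⟩ : ∃ q qs, split1 a.toList = q :: qs := by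
    cases h : split1 a.toList with
    | nil => exact absurd h (split1_ne_nil _)
    | cons q qs => exact ⟨q, qs, rfl⟩
  rw [scanArg_eq a.toList [] [] refs q qs hq (by simp) (fun _ => rfl), hq,
    firstTok_nil_nil]
  simp [List.filterMap_cons, fCh]
  by_cases h : PySem.Chars.strip q = [] <;> simp [h]

theorem parse_refs_alt_eq (args : List String) : ∀ (refs : List String),
    args.foldl (fun refs arg => scanArg arg.toList [] [] refs) refs
      = refs ++ args.flatMap
          (fun a => ((split1 a.toList).filterMap fCh).map String.ofList) := by
  induction args with
  | nil => simp
  | cons a rest ih =>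
    intro refs
    simp only [List.foldl_cons, List.flatMap_cons]
    rw [scanArg_spec, ih, List.append_assoc]

-- ===== VERDICT (by name: the statement is the Claim_ definition above) =====
theorem parse_refs_spec : Claim_equal_parse_refs := by
  intro args _
  unfold Spec_parse_refs
  rw [parse_refs_eq]
  unfold parse_refs_alt
  rw [parse_refs_alt_eq]
  simp
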